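-- pv_equiv track=rewrite | github.com/nhannt201/100AlgorithmsChallenge_PyThon | 11.alphabetSubSequence.py | alphabetSubsequence
-- ===== SOURCE A (Python) =====
-- alphabetChar = ['a','b','c','d','e','f','g','h','i','j','k','l','m','n','o','p','q','r','s','t','u','v','w','x','y','z'];
--
-- def alphabetSubsequence(string):
--     vitri = 0
--     len_or = len(string)
--     dung = 0
--     for x in string:
--         for y in range(vitri, len(alphabetChar)):
--             if x == alphabetChar[y]:
--                 vitri = y
--                 dung = dung + 1
--
--     if dung == len(string):
--         return True
--     else:
--         return False
-- ===== SOURCE B (Python) =====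
-- def alphabetSubsequence(string):
--     return all('a' <= c <= 'z' for c in string) and list(string) == sorted(string)
-- ===== Notes on version B (the rewrite author's own statement) =====
-- stated objective: idiomatic
-- what changed: Replaces the nested scan of a 26-letter table with a moving pointer by a one-line check: every character is a lowercase letter and the string equals its sorted copy.
import Mathlib
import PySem

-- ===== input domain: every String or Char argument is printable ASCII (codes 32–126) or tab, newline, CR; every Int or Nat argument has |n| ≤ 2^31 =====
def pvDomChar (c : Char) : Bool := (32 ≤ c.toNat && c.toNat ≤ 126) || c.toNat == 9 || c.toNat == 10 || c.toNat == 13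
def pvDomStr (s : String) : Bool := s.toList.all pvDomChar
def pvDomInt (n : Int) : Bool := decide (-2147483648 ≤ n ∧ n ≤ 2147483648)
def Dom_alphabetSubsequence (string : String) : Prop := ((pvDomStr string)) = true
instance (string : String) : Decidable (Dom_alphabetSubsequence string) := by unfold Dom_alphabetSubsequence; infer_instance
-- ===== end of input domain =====

-- B replaces A's nested alphabet-table scan with a one-line lowercase + sorted-copy comparison (idiomatic, same behaviour).

-- ===== PORT A =====
def alphabetChar : List Char :=
  ['a','b','c','d','e','f','g','h','i','j','k','l','m',
   'n','o','p','q','r','s','t','u','v','w','x','y','z']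

-- literal port of A: outer fold over the characters, inner fold over range(vitri, 26);
-- alphabetChar[y] with y always in range is PySem.List.pyGet? (compared as 'some x == …').
def alphabetSubsequence (string : String) : Bool :=
  let st :=
    string.toList.foldl
      (fun (st : Int × Int) x =>
        (PySem.List.pyRange st.1 (PySem.List.len alphabetChar) 1).foldl
          (fun (st2 : Int × Int) y =>
            if some x == PySem.List.pyGet? alphabetChar y then (y, st2.2 + 1) else st2)
          st)
      ((0 : Int), (0 : Int))
  decide (st.2 = PySem.Str.len string)

-- ===== PORT B =====
def alphabetSubsequence_alt (string : String) : Bool :=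
  string.toList.all (fun c => decide ('a' ≤ c) && decide (c ≤ 'z')) &&
  (string.toList == PySem.List.sorted string.toList (fun c => c) false)

-- ===== PRECONDITION & SPEC =====
def Spec_alphabetSubsequence (string : String) (out : Bool) : Prop := out = alphabetSubsequence_alt string
instance (string : String) (out : Bool) : Decidable (Spec_alphabetSubsequence string out) := by unfold Spec_alphabetSubsequence; infer_instance

-- ===== CLAIM (what is proved, stated in full; the proofs are below) =====
def Claim_equal_alphabetSubsequence : Prop := ∀ (string : String), Dom_alphabetSubsequence string → Spec_alphabetSubsequence string (alphabetSubsequence string)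

-- ===== LEMMAS AND PROOFS =====
set_option maxRecDepth 4000

-- the inner-loop step of A's port
def pvIStep (x : Char) (st2 : Int × Int) (y : Int) : Int × Int :=
  if some x == PySem.List.pyGet? alphabetChar y then (y, st2.2 + 1) else st2

theorem pvCharLe_iff (a b : Char) : a ≤ b ↔ a.toNat ≤ b.toNat := by
  rw [Char.le_def, UInt32.le_iff_toNat_le]; rfl

theorem pvAlphaCode (k : Nat) (h : k < 26) :
    (alphabetChar[k]'(by rw [show alphabetChar.length = 26 from rfl]; exact h)).toNat = 97 + k := by
  interval_cases k <;> rfl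

theorem pvMatch_iff (x : Char) (y : Int) (h0 : 0 ≤ y) (h1 : y < 26) :
    (some x == PySem.List.pyGet? alphabetChar y) = true ↔ (x.toNat : Int) = 97 + y := by
  have hk : y.toNat < alphabetChar.length := by
    rw [show alphabetChar.length = 26 from rfl]; omega
  rw [PySem.List.pyGet?_of_nonneg _ h0, List.getElem?_eq_getElem hk]
  simp only [beq_iff_eq, Option.some.injEq]
  have hcode := pvAlphaCode y.toNat (by omega)
  constructor
  · intro h
    rw [h, hcode]; omega
  · intro h
    have hx : x.toNat = (alphabetChar[y.toNat]).toNat := by omega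
    exact Char.ext (UInt32.toNat_inj.mp hx)

theorem pvNoMatch (x : Char) (l : List Int) (p : Int × Int)
    (h : ∀ y ∈ l, (some x == PySem.List.pyGet? alphabetChar y) = false) :
    l.foldl (pvIStep x) p = p := by
  induction l generalizing p with
  | nil => rfl
  | cons y t ih =>
      have hy := h y (by simp)
      simp only [List.foldl, pvIStep, hy, Bool.false_eq_true, reduceIte]
      exact ih _ (fun z hz => h z (by simp [hz]))

theorem pvInner (x : Char) (v : Int) (p : Int × Int) (h0 : 0 ≤ v) (h1 : v ≤ 26) :
    (PySem.List.pyRange v 26 1).foldl (pvIStep x) p =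
      if 97 + v ≤ (x.toNat : Int) ∧ (x.toNat : Int) ≤ 122 then ((x.toNat : Int) - 97, p.2 + 1)
      else p := by
  induction hgen : (26 - v).toNat generalizing v p with
  | zero =>
      have hv : v = 26 := by omega
      subst hv
      rw [PySem.List.pyRange_one_eq_nil (by omega), List.foldl_nil,
        if_neg (by omega)]
  | succ n ih =>
      have hvlt : v < 26 := by omega
      rw [PySem.List.pyRange_one_cons (by omega)]
      simp only [List.foldl]
      by_cases hm : (some x == PySem.List.pyGet? alphabetChar v) = true
      · have hx : (x.toNat : Int) = 97 + v := (pvMatch_iff x v h0 hvlt).mp hm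
        have hrest : (PySem.List.pyRange (v+1) 26 1).foldl (pvIStep x) (v, p.2 + 1) = (v, p.2 + 1) := by
          apply pvNoMatch
          intro y hy
          have hy' := (PySem.List.mem_pyRange_one).mp hy
          have hne : ¬ ((x.toNat : Int) = 97 + y) := by omega
          rcases Bool.eq_false_or_eq_true (some x == PySem.List.pyGet? alphabetChar y) with h | h
          · exact absurd ((pvMatch_iff x y (by omega) (by omega)).mp h) hne
          · exact h
        have hcond : 97 + v ≤ (x.toNat : Int) ∧ (x.toNat : Int) ≤ 122 := by omega
        rw [show pvIStep x p v = (v, p.2 + 1) from by simp [pvIStep, hm], hrest,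
          if_pos hcond]
        have : (x.toNat : Int) - 97 = v := by omega
        rw [this]
      · have hm' : (some x == PySem.List.pyGet? alphabetChar v) = false := by
          simpa using hm
        have hx : ¬ ((x.toNat : Int) = 97 + v) := by
          intro h; exact hm ((pvMatch_iff x v h0 hvlt).mpr h)
        rw [show pvIStep x p v = p from by simp [pvIStep, hm']]
        rw [ih (v+1) p (by omega) (by omega) (by omega)]
        exact if_congr (by omega) rfl rfl

-- 'pvGood v l': every char of l would be matched by A's scan starting the pointer at v
def pvGood : Int → List Char → Prop
  | _, [] => True
  | v, x :: t => (97 + v ≤ (x.toNat : Int) ∧ (x.toNat : Int) ≤ 122) ∧ pvGood ((x.toNat : Int) - 97) t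

def pvOStep (st : Int × Int) (x : Char) : Int × Int :=
  (PySem.List.pyRange st.1 (PySem.List.len alphabetChar) 1).foldl (pvIStep x) st

theorem pvLenAlpha : PySem.List.len alphabetChar = 26 := by decide

theorem pvOuter (l : List Char) (v d : Int) (h0 : 0 ≤ v) (h1 : v ≤ 26) :
    ((l.foldl pvOStep (v, d)).2 = d + l.length ↔ pvGood v l) ∧
    (l.foldl pvOStep (v, d)).2 ≤ d + l.length := by
  induction l generalizing v d with
  | nil => simp [pvGood]
  | cons x t ih =>
      have hstep : pvOStep (v, d) x =
          if 97 + v ≤ (x.toNat : Int) ∧ (x.toNat : Int) ≤ 122 then ((x.toNat : Int) - 97, d + 1)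
          else (v, d) := by
        rw [pvOStep, pvLenAlpha]
        exact pvInner x v (v, d) h0 h1
      by_cases hc : 97 + v ≤ (x.toNat : Int) ∧ (x.toNat : Int) ≤ 122
      · have ih' := ih ((x.toNat : Int) - 97) (d + 1) (by omega) (by omega)
        simp only [List.foldl, hstep, if_pos hc, List.length_cons, pvGood]
        constructor
        · constructor
          · intro h
            exact ⟨hc, ih'.1.mp (by omega)⟩
          · intro h
            have := ih'.1.mpr h.2
            omega
        · have := ih'.2
          omega
      · have ih' := ih v d h0 h1
        simp only [List.foldl, hstep, if_neg hc, List.length_cons, pvGood]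
        constructor
        · constructor
          · intro h
            exfalso; have := ih'.2; omega
          · intro h
            exact absurd h.1 hc
        · have := ih'.2
          omega

theorem pvGood_cons_iff (t : List Char) (x : Char) (hx : 97 ≤ x.toNat) :
    pvGood ((x.toNat : Int) - 97) t ↔
      (∀ c ∈ t, 97 ≤ (c.toNat : Int) ∧ (c.toNat : Int) ≤ 122) ∧
      (x :: t).IsChain (fun a b => a.toNat ≤ b.toNat) := by
  induction t generalizing x with
  | nil => simp [pvGood]
  | cons y t' ih =>
      simp only [pvGood, List.isChain_cons_cons, List.mem_cons, forall_eq_or_imp]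
      constructor
      · rintro ⟨⟨h1, h2⟩, hrest⟩
        have hy : 97 ≤ y.toNat := by omega
        rcases (ih y hy).mp hrest with ⟨h3, h4⟩
        exact ⟨⟨⟨by omega, h2⟩, h3⟩, by omega, h4⟩
      · rintro ⟨⟨⟨h1, h2⟩, h3⟩, h4, h5⟩
        exact ⟨⟨by omega, h2⟩, (ih y (by omega)).mpr ⟨h3, h5⟩⟩

theorem pvGood_zero_iff (l : List Char) :
    pvGood 0 l ↔
      (∀ c ∈ l, 97 ≤ (c.toNat : Int) ∧ (c.toNat : Int) ≤ 122) ∧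
      l.IsChain (fun a b => a.toNat ≤ b.toNat) := by
  cases l with
  | nil => simp [pvGood]
  | cons x t =>
      simp only [pvGood, List.mem_cons, forall_eq_or_imp]
      constructor
      · rintro ⟨⟨h1, h2⟩, hrest⟩
        rcases (pvGood_cons_iff t x (by omega)).mp hrest with ⟨h3, h4⟩
        exact ⟨⟨⟨by omega, h2⟩, h3⟩, h4⟩
      · rintro ⟨⟨⟨h1, h2⟩, h3⟩, h4⟩
        exact ⟨⟨by omega, h2⟩, (pvGood_cons_iff t x (by omega)).mpr ⟨h3, h4⟩⟩

theorem pvSortedSelf_iff (l : List Char) :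
    (l == PySem.List.sorted l (fun c => c) false) = true ↔ l.Pairwise (· ≤ ·) := by
  constructor
  · intro h
    have h' : l = PySem.List.sorted l (fun c => c) false := by simpa using h
    have hp := PySem.List.sorted_pairwise (xs := l) (key := fun c => c)
    rw [← h'] at hp
    simpa using hp
  · intro h
    have := PySem.List.sorted_eq_self_of_pairwise (xs := l) (key := fun c => c) (by simpa using h)
    simp [this]

theorem pvLower_iff (c : Char) :
    (decide ('a' ≤ c) && decide (c ≤ 'z')) = true ↔
      97 ≤ (c.toNat : Int) ∧ (c.toNat : Int) ≤ 122 := by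
  have ha : 'a'.toNat = 97 := rfl
  have hz : 'z'.toNat = 122 := rfl
  simp only [Bool.and_eq_true, decide_eq_true_iff, pvCharLe_iff, ha, hz]
  omega

theorem pvPairwise_iff (l : List Char) :
    l.Pairwise (· ≤ ·) ↔ l.IsChain (fun a b => a.toNat ≤ b.toNat) := by
  constructor
  · intro h
    rw [← List.isChain_iff_pairwise] at h
    exact h.imp fun a b hab => (pvCharLe_iff _ _).mp hab
  · intro h
    rw [← List.isChain_iff_pairwise]
    exact h.imp fun a b hab => (pvCharLe_iff _ _).mpr hab

-- ===== VERDICT (by name: the statement is the Claim_ definition above) =====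
theorem alphabetSubsequence_spec : Claim_equal_alphabetSubsequence := by
  intro s _
  unfold Spec_alphabetSubsequence alphabetSubsequence alphabetSubsequence_alt
  set l := s.toList with hl
  have hfold : l.foldl
      (fun (st : Int × Int) x =>
        (PySem.List.pyRange st.1 (PySem.List.len alphabetChar) 1).foldl
          (fun (st2 : Int × Int) y =>
            if some x == PySem.List.pyGet? alphabetChar y then (y, st2.2 + 1) else st2)
          st) ((0 : Int), (0 : Int)) = l.foldl pvOStep ((0 : Int), (0 : Int)) := rfl
  have hlen : PySem.Str.len s = (l.length : Int) := by
    simp [PySem.Str.len, hl]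
  simp only [hfold, hlen]
  rw [Bool.eq_iff_iff]
  have hA : (decide ((l.foldl pvOStep ((0:Int),(0:Int))).2 = (l.length : Int))) = true ↔ pvGood 0 l := by
    rw [decide_eq_true_iff]
    simpa using (pvOuter l 0 0 (by norm_num) (by norm_num)).1
  have hB : (l.all (fun c => decide ('a' ≤ c) && decide (c ≤ 'z')) &&
      (l == PySem.List.sorted l (fun c => c) false)) = true ↔ pvGood 0 l := by
    rw [Bool.and_eq_true, pvSortedSelf_iff, pvGood_zero_iff, pvPairwise_iff]
    simp only [List.all_eq_true, pvLower_iff]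
  exact hA.trans hB.symm
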